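-- pv_equiv track=rewrite | github.com/vishalxtyagi/flutter-font-renamer | renamer.py | convert_to_underscore_case
-- ===== SOURCE A (Python) =====
-- def convert_to_underscore_case(input_str):
--     result = ""
--     for char in input_str:
--         if char.isupper():
--             result += f"_{char.lower()}"
--         else:
--             result += char
--     # Remove the leading underscore (if any)
--     result = result.lstrip("_")
--     return result
-- ===== SOURCE B (Python) =====
-- def convert_to_underscore_case(input_str):
--     # Stage 1: compute the cut positions (indices of uppercase chars), stage 2: slice the
--     # string at those boundaries, stage 3: join with '_', lowercase everything, strip.
--     bounds = [0] + [i for i, ch in enumerate(input_str) if ch.isupper()] + [len(input_str)]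
--     parts = [input_str[a:b] for a, b in zip(bounds, bounds[1:])]
--     return "_".join(parts).lower().lstrip("_")
-- ===== Notes on version B (the rewrite author's own statement) =====
-- stated objective: alternative
-- what changed: B replaces A's per-character conditional string accumulation with a staged pipeline: compute the uppercase cut indices, slice the string at those boundaries, join the slices with underscores, lowercase the whole joined string in one pass, then strip leading underscores.
import Mathlib
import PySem

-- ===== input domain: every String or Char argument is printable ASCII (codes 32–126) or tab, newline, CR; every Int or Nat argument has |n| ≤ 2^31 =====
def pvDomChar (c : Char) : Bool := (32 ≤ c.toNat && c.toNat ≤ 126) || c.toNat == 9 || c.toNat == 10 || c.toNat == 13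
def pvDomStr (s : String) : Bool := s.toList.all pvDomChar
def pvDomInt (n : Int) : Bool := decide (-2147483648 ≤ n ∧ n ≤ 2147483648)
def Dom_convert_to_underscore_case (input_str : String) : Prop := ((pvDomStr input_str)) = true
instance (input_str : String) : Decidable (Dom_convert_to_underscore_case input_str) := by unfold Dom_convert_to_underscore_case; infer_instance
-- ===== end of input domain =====

-- B recomputes the result by a staged algorithm — collect the uppercase cut indices, slice the
-- string at those boundaries, join with underscores, lowercase the whole string, strip — instead
-- of A's per-character conditional accumulation (objective: alternative; same cost).


-- ===== PORT A =====
-- one loop step: result += "_" + char.lower() if char.isupper() else char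
def pvAstep (r : List Char) (c : Char) : List Char :=
  if PySem.Chars.isupper c then r ++ ['_', PySem.Chars.lowerChar c] else r ++ [c]

-- .lstrip("_") ported as dropWhile (· == '_'): exact, the strip set is the single char '_'
def convert_to_underscore_case (input_str : String) : String :=
  String.mk ((input_str.toList.foldl pvAstep []).dropWhile (· == '_'))

-- ===== PORT B =====
-- cuts: [i for i, ch in enumerate(input_str) if ch.isupper()]; bounds = [0] + cuts + [len]
def pvCuts (l : List Char) : List Int :=
  (PySem.List.enumerate l).filterMap (fun p => if PySem.Chars.isupper p.2 then some p.1 else none)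

def pvBounds (l : List Char) : List Int := 0 :: pvCuts l ++ [(l.length : Int)]

-- parts = [input_str[a:b] for a, b in zip(bounds, bounds[1:])]
def pvParts (l : List Char) : List (List Char) :=
  ((pvBounds l).zip (PySem.List.slice (pvBounds l) (some 1) none)).map
    (fun p => PySem.List.slice l (some p.1) (some p.2))

-- "_".join(parts).lower().lstrip("_")  (lstrip("_") = dropWhile (· == '_'), exact)
def convert_to_underscore_case_alt (input_str : String) : String :=
  String.mk ((PySem.Chars.lower (PySem.Chars.join ['_'] (pvParts input_str.toList))).dropWhile (· == '_'))

-- ===== PRECONDITION & SPEC =====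
def Spec_convert_to_underscore_case (input_str : String) (out : String) : Prop := out = convert_to_underscore_case_alt input_str
instance (input_str : String) (out : String) : Decidable (Spec_convert_to_underscore_case input_str out) := by unfold Spec_convert_to_underscore_case; infer_instance

-- ===== CLAIM (what is proved, stated in full; the proofs are below) =====
def Claim_equal_convert_to_underscore_case : Prop := ∀ (input_str : String), Dom_convert_to_underscore_case input_str → Spec_convert_to_underscore_case input_str (convert_to_underscore_case input_str)

-- ===== LEMMAS AND PROOFS =====

-- what A's loop appends for one char
def pvG (c : Char) : List Char :=
  if PySem.Chars.isupper c then ['_', PySem.Chars.lowerChar c] else [c]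

-- '_' inserted before an uppercase char, case kept (B's pre-lower shape)
def pvIns (c : Char) : List Char :=
  if PySem.Chars.isupper c then ['_', c] else [c]

theorem pvA_foldl (cs : List Char) (r : List Char) :
    cs.foldl pvAstep r = r ++ cs.flatMap pvG := by
  induction cs generalizing r with
  | nil => simp
  | cons c cs ih =>
    simp only [List.foldl_cons, List.flatMap_cons, ih, pvAstep, pvG]
    split <;> simp

theorem pvLower_flatMap_ins (cs : List Char) :
    (cs.flatMap pvIns).map PySem.Chars.lowerChar = cs.flatMap pvG := by
  induction cs with
  | nil => simp
  | cons c cs ih =>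
    simp only [List.flatMap_cons, List.map_append, ih, pvIns, pvG]
    by_cases hu : PySem.Chars.isupper c
    · simp only [hu, if_true, List.map_cons, List.map_nil]
      have : PySem.Chars.lowerChar '_' = '_' := by decide
      rw [this]
    · simp [hu, PySem.Chars.lowerChar]

theorem pvEnumerate_append {α : Type} (l : List α) (c : α) (s : Int) :
    PySem.List.enumerate (l ++ [c]) s = PySem.List.enumerate l s ++ [(s + l.length, c)] := by
  induction l generalizing s with
  | nil => simp [PySem.List.enumerate_nil, PySem.List.enumerate_cons]
  | cons a t ih =>
    simp [PySem.List.enumerate_cons, ih]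
    ring_nf

theorem pvCuts_append (l : List Char) (c : Char) :
    pvCuts (l ++ [c]) = pvCuts l ++ (if PySem.Chars.isupper c then [(l.length : Int)] else []) := by
  unfold pvCuts
  rw [pvEnumerate_append, List.filterMap_append]
  split <;> simp_all

theorem pvCuts_bounds (l : List Char) (x : Int) (hx : x ∈ pvCuts l) :
    0 ≤ x ∧ x ≤ (l.length : Int) := by
  unfold pvCuts at hx
  obtain ⟨p, hp, hf⟩ := List.mem_filterMap.mp hx
  have hx1 : x = p.1 := by
    by_cases hu : PySem.Chars.isupper p.2 <;> simp [hu] at hf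
    exact hf.symm
  have hmem : p.1 ∈ (PySem.List.enumerate l 0).map (·.1) := List.mem_map_of_mem hp
  rw [PySem.List.map_fst_enumerate] at hmem
  have := (PySem.List.mem_pyRange_one).mp (by simpa using hmem)
  subst hx1
  omega

-- consecutive pairs of a list
theorem pvZip_tail_snoc (t : List Int) (a n : Int) :
    ((a :: t ++ [n]).zip ((a :: t ++ [n]).tail)) =
      ((a :: t).zip t) ++ [((a :: t).getLast (by simp), n)] := by
  induction t generalizing a with
  | nil => simp
  | cons b r ih =>
    have h1 : (a :: (b :: r) ++ [n]).zip ((a :: (b :: r) ++ [n]).tail)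
        = (a, b) :: ((b :: r ++ [n]).zip ((b :: r ++ [n]).tail)) := by
      simp [List.zip]
    rw [h1, ih b]
    simp [List.getLast]

theorem pvMem_zip_tail (l : List Int) (p : Int × Int) (hp : p ∈ l.zip l.tail) :
    p.1 ∈ l ∧ p.2 ∈ l := by
  induction l with
  | nil => simp at hp
  | cons a t ih =>
    cases t with
    | nil => simp at hp
    | cons b r =>
      simp only [List.tail_cons, List.zip_cons_cons, List.mem_cons] at hp
      rcases hp with h | h
      · subst h; simp
      · have := ih (by simpa using h)
        exact ⟨List.mem_cons_of_mem _ this.1, List.mem_cons_of_mem _ this.2⟩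

-- slicing lemmas
theorem pvSlice_frozen (l : List Char) (c : Char) (a b : Int)
    (ha : 0 ≤ a) (hal : a ≤ (l.length : Int)) (hb : 0 ≤ b) (hbl : b ≤ (l.length : Int)) :
    PySem.List.slice (l ++ [c]) (some a) (some b) = PySem.List.slice l (some a) (some b) := by
  rw [PySem.List.slice_toNat _ ha hb, PySem.List.slice_toNat _ ha hb]
  rw [List.drop_append]
  have h1 : a.toNat - l.length = 0 := by omega
  have h2 : b.toNat - a.toNat ≤ (l.drop a.toNat).length := by simp; omega
  have h3 : b.toNat - a.toNat - (l.drop a.toNat).length = 0 := by simp; omega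
  rw [h1, List.take_append, h3, List.take_zero, List.append_nil]

theorem pvSlice_last (l : List Char) (c : Char) (k : Int)
    (hk : 0 ≤ k) (hkl : k ≤ (l.length : Int)) :
    PySem.List.slice (l ++ [c]) (some k) (some ((l.length : Int) + 1)) =
      PySem.List.slice l (some k) (some (l.length : Int)) ++ [c] := by
  rw [PySem.List.slice_toNat _ hk (by omega), PySem.List.slice_toNat _ hk (by omega)]
  rw [List.drop_append]
  have h1 : k.toNat - l.length = 0 := by omega
  rw [h1, List.drop_zero]
  have h2 : ((l.length : Int) + 1).toNat - k.toNat = (l.drop k.toNat).length + 1 := by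
    simp only [List.length_drop]; omega
  have h3 : ((l.length : Int)).toNat - k.toNat = (l.drop k.toNat).length := by
    simp only [List.length_drop]; omega
  rw [h2, h3, List.take_append]
  simp

-- join lemmas
theorem pvJoin_snoc (sep : List Char) (xs : List (List Char)) (y : List Char) (hxs : xs ≠ []) :
    PySem.Chars.join sep (xs ++ [y]) = PySem.Chars.join sep xs ++ sep ++ y := by
  induction xs with
  | nil => simp at hxs
  | cons a t ih =>
    cases t with
    | nil => simp [PySem.Chars.join_cons_cons, PySem.Chars.join_singleton]
    | cons b r =>
      have h1 : a :: (b :: r) ++ [y] = a :: (b :: (r ++ [y])) := by simp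
      rw [h1, PySem.Chars.join_cons_cons]
      have h2 : b :: (r ++ [y]) = (b :: r) ++ [y] := by simp
      rw [h2, ih (by simp), PySem.Chars.join_cons_cons]
      simp

theorem pvJoin_snoc_ext (sep : List Char) (xs : List (List Char)) (y z : List Char) :
    PySem.Chars.join sep (xs ++ [y ++ z]) = PySem.Chars.join sep (xs ++ [y]) ++ z := by
  cases xs with
  | nil => simp [PySem.Chars.join_singleton]
  | cons a t =>
    rw [pvJoin_snoc sep (a :: t) (y ++ z) (by simp), pvJoin_snoc sep (a :: t) y (by simp)]
    simp

theorem pvParts_eq (l : List Char) :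
    pvParts l = ((pvBounds l).zip (pvBounds l).tail).map
      (fun p => PySem.List.slice l (some p.1) (some p.2)) := by
  unfold pvParts
  rw [PySem.List.slice_from_one]

theorem pvBounds_mem (l : List Char) (x : Int) (hx : x ∈ pvBounds l) :
    0 ≤ x ∧ x ≤ (l.length : Int) := by
  unfold pvBounds at hx
  simp only [List.mem_cons, List.mem_append] at hx
  rcases hx with (h | h) | h | h <;>
    first
      | exact pvCuts_bounds l x h
      | omega
      | simp at h

-- the core: B's join-of-slices equals inserting '_' before each uppercase char
theorem pvB_core (l : List Char) :
    PySem.Chars.join ['_'] (pvParts l) = l.flatMap pvIns := by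
  induction l using List.reverseRecOn with
  | nil => rfl
  | append_singleton l c ih =>
    have hlen : (((l ++ [c]).length : Int)) = (l.length : Int) + 1 := by simp
    rw [pvParts_eq] at ih ⊢
    rw [List.flatMap_append]
    by_cases hu : PySem.Chars.isupper c
    -- uppercase: a fresh one-char part is appended after a '_' separator
    · have hb : pvBounds (l ++ [c])
          = 0 :: (pvCuts l ++ [(l.length : Int)]) ++ [(l.length : Int) + 1] := by
        unfold pvBounds
        rw [pvCuts_append, hlen]
        simp [hu]
      have hbl : pvBounds l = 0 :: pvCuts l ++ [(l.length : Int)] := rfl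
      rw [hb, pvZip_tail_snoc]
      have hlast : ((0 :: (pvCuts l ++ [(l.length : Int)])).getLast (by simp))
          = (l.length : Int) := List.getLast_concat (l := (0 : Int) :: pvCuts l)
      rw [hlast, List.map_append]
      have hmap : ((0 :: (pvCuts l ++ [(l.length : Int)])).zip (pvCuts l ++ [(l.length : Int)])).map
            (fun p => PySem.List.slice (l ++ [c]) (some p.1) (some p.2))
          = ((pvBounds l).zip (pvBounds l).tail).map
            (fun p => PySem.List.slice l (some p.1) (some p.2)) := by
        rw [hbl]
        apply List.map_congr_left
        intro p hp
        have hm := pvMem_zip_tail (0 :: pvCuts l ++ [(l.length : Int)]) p (by simpa using hp)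
        have h1 := pvBounds_mem l p.1 (by rw [hbl]; exact hm.1)
        have h2 := pvBounds_mem l p.2 (by rw [hbl]; exact hm.2)
        exact pvSlice_frozen l c p.1 p.2 h1.1 h1.2 h2.1 h2.2
      rw [hmap]
      have hlastslice : List.map (fun p : Int × Int => PySem.List.slice (l ++ [c]) (some p.1) (some p.2))
            [((l.length : Int), (l.length : Int) + 1)] = [[c]] := by
        simp only [List.map_singleton]
        rw [pvSlice_last l c (l.length : Int) (by omega) (by omega)]
        simp [PySem.List.slice_natCast]
      rw [hlastslice]
      have hne : ((pvBounds l).zip (pvBounds l).tail).map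
            (fun p => PySem.List.slice l (some p.1) (some p.2)) ≠ [] := by
        rw [hbl]
        simp [List.zip]
      rw [pvJoin_snoc _ _ _ hne, ih]
      simp [pvIns, hu]
    -- not uppercase: the last part is extended by the char
    · have hb : pvBounds (l ++ [c])
          = 0 :: pvCuts l ++ [(l.length : Int) + 1] := by
        unfold pvBounds
        rw [pvCuts_append, hlen]
        simp [hu]
      have hbl : pvBounds l = 0 :: pvCuts l ++ [(l.length : Int)] := rfl
      have hm0 : ((0 : Int) :: pvCuts l).getLast (by simp) ∈ (0 : Int) :: pvCuts l :=
        List.getLast_mem _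
      have hmb : 0 ≤ ((0 : Int) :: pvCuts l).getLast (by simp) ∧
          ((0 : Int) :: pvCuts l).getLast (by simp) ≤ (l.length : Int) := by
        rcases List.mem_cons.mp hm0 with h | h
        · omega
        · exact pvCuts_bounds l _ h
      rw [hb, pvZip_tail_snoc, List.map_append]
      rw [hbl, pvZip_tail_snoc, List.map_append, List.map_singleton] at ih
      have hmap : ((((0 : Int) :: pvCuts l).zip (pvCuts l)).map
            (fun p => PySem.List.slice (l ++ [c]) (some p.1) (some p.2)))
          = (((0 : Int) :: pvCuts l).zip (pvCuts l)).map
            (fun p => PySem.List.slice l (some p.1) (some p.2)) := by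
        apply List.map_congr_left
        intro p hp
        have hm := pvMem_zip_tail ((0 : Int) :: pvCuts l) p (by simpa using hp)
        have h1 : 0 ≤ p.1 ∧ p.1 ≤ (l.length : Int) := by
          rcases List.mem_cons.mp hm.1 with h | h
          · omega
          · exact pvCuts_bounds l _ h
        have h2 : 0 ≤ p.2 ∧ p.2 ≤ (l.length : Int) := by
          rcases List.mem_cons.mp hm.2 with h | h
          · omega
          · exact pvCuts_bounds l _ h
        exact pvSlice_frozen l c p.1 p.2 h1.1 h1.2 h2.1 h2.2
      rw [hmap]
      have hlastslice : List.map (fun p : Int × Int => PySem.List.slice (l ++ [c]) (some p.1) (some p.2))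
            [(((0 : Int) :: pvCuts l).getLast (by simp), (l.length : Int) + 1)]
          = [PySem.List.slice l (some (((0 : Int) :: pvCuts l).getLast (by simp)))
              (some (l.length : Int)) ++ [c]] := by
        simp only [List.map_singleton]
        rw [pvSlice_last l c _ hmb.1 hmb.2]
      rw [hlastslice, pvJoin_snoc_ext, ih]
      simp [pvIns, hu]

-- ===== VERDICT (by name: the statement is the Claim_ definition above) =====
theorem convert_to_underscore_case_spec : Claim_equal_convert_to_underscore_case := by
  intro input_str _
  unfold Spec_convert_to_underscore_case convert_to_underscore_case convert_to_underscore_case_alt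
  congr 1
  rw [pvA_foldl]
  unfold PySem.Chars.lower
  rw [pvB_core, pvLower_flatMap_ins]
  simp
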